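-- pv_equiv track=rewrite | github.com/joshanashakya/dissertation | workspace/dataset/java-python/GeeksForGeeks/3239/A/2.py | check
-- ===== SOURCE A (Python) =====
-- def check(arr, n):
--     count = 0;
--
--     for i in range(n):
--
--         # Count the number
--         # of odd elements
--         if (arr[i] & 1):
--             count = count + 1;
--
--     # If count of odd elements
--     # is odd, then XOR will be odd
--     if (count & 1):
--         return "Odd";
--
--     # Else even
--     else:
--         return "Even";
-- ===== SOURCE B (Python) =====
-- def check(arr, n):
--     # Divide-and-conquer: recursively XOR-reduce arr[lo:hi] as a balanced tree,
--     # then read the answer off the low bit of the total XOR.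
--     def xor_range(lo, hi):
--         if hi - lo == 1:
--             return arr[lo]
--         mid = (lo + hi) // 2
--         return xor_range(lo, mid) ^ xor_range(mid, hi)
--     if n <= 0:
--         return "Even"
--     return "Odd" if xor_range(0, n) & 1 else "Even"
-- ===== Notes on version B (the rewrite author's own statement) =====
-- stated objective: alternative
-- what changed: B replaces the iterative odd-element counter with a recursive divide-and-conquer XOR reduction of arr[0:n] (a balanced binary tree of ^ combines), answering from the low bit of the total XOR; correctness rests on XOR's low bit equalling the parity of the count of odd operands.
import Mathlib
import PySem

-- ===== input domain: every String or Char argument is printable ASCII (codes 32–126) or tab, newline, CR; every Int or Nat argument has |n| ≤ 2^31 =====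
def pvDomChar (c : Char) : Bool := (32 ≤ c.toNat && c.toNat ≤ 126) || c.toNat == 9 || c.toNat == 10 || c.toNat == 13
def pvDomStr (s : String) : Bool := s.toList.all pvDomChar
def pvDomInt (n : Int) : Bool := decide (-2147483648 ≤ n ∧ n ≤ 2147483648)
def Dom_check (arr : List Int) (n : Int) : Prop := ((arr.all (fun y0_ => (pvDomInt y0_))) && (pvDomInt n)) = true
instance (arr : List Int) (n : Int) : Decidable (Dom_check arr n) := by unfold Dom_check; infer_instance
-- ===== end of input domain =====

-- B replaces the iterative odd-counter with a recursive divide-and-conquer XOR reduction; same O(n) cost.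

-- ===== PORT A =====
-- count odd elements of arr[0..n-1], answer by the count's parity.
-- Pre_check guarantees every index is in range, so pyGetD's default is never read.
def check (arr : List Int) (n : Int) : String :=
  let count := (PySem.List.pyRange 0 n 1).foldl
    (fun count i => if PySem.Int.band (PySem.List.pyGetD arr i 0) 1 ≠ 0 then count + 1 else count) 0
  if PySem.Int.band count 1 ≠ 0 then "Odd" else "Even"

-- ===== PORT B =====
-- xor_range(lo, hi): balanced-tree XOR of arr[lo:hi]; only ever called with lo < hi,
-- (the Lean base case 'hi ≤ lo + 1' coincides with Python's 'hi - lo == 1' on all reached calls;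
-- Python would recurse forever on the unreached hi ≤ lo).
def xorRange (arr : List Int) (lo hi : Nat) : Int :=
  if hi ≤ lo + 1 then PySem.List.pyGetD arr (lo : Int) 0
  else
    let mid := (lo + hi) / 2
    PySem.Int.bxor (xorRange arr lo mid) (xorRange arr mid hi)
termination_by hi - lo
decreasing_by all_goals omega

def check_alt (arr : List Int) (n : Int) : String :=
  if n ≤ 0 then "Even"
  else if PySem.Int.band (xorRange arr 0 n.toNat) 1 ≠ 0 then "Odd" else "Even"

-- ===== PRECONDITION & SPEC =====
-- A raises IndexError when n exceeds len(arr) (arr[i] out of range); exactly those inputs are excluded.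
def Pre_check (arr : List Int) (n : Int) : Prop := n ≤ (arr.length : Int)
instance (arr : List Int) (n : Int) : Decidable (Pre_check arr n) := by unfold Pre_check; infer_instance
def pvWitness_check : List Int × Int := ([1, 2, 3], 3)
def Spec_check (arr : List Int) (n : Int) (out : String) : Prop := out = check_alt arr n
instance (arr : List Int) (n : Int) (out : String) : Decidable (Spec_check arr n out) := by unfold Spec_check; infer_instance

-- ===== CLAIM (what is proved, stated in full; the proofs are below) =====
def Claim_equal_check : Prop := ∀ (arr : List Int) (n : Int), Dom_check arr n → Pre_check arr n → Spec_check arr n (check arr n)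

-- ===== LEMMAS AND PROOFS =====
lemma nat_xor_par (m n : Nat) : (m ^^^ n) % 2 = (m + n) % 2 := by
  have h := Nat.testBit_xor m n 0
  simp only [Nat.testBit_zero] at h
  have h1 := Nat.mod_two_eq_zero_or_one m
  have h2 := Nat.mod_two_eq_zero_or_one n
  rcases h1 with h1|h1 <;> rcases h2 with h2|h2 <;> simp [h1, h2] at h ⊢

lemma bxor_par (a b : Int) : PySem.Int.bxor a b % 2 = (a + b) % 2 := by
  unfold PySem.Int.bxor
  split_ifs with ha hb hb
  · have h := nat_xor_par a.toNat b.toNat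
    have : ((a.toNat ^^^ b.toNat : Nat) : Int) % 2 = (((a.toNat + b.toNat : Nat)) : Int) % 2 := by
      exact_mod_cast h
    push_cast at this; omega
  · have h := nat_xor_par a.toNat (-b - 1).toNat
    have : ((a.toNat ^^^ (-b - 1).toNat : Nat) : Int) % 2
        = (((a.toNat + (-b - 1).toNat : Nat)) : Int) % 2 := by
      exact_mod_cast h
    push_cast at this; omega
  · have h := nat_xor_par (-a - 1).toNat b.toNat
    have : (((-a - 1).toNat ^^^ b.toNat : Nat) : Int) % 2
        = ((((-a - 1).toNat + b.toNat : Nat)) : Int) % 2 := by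
      exact_mod_cast h
    push_cast at this; omega
  · have h := nat_xor_par (-a - 1).toNat (-b - 1).toNat
    have : (((-a - 1).toNat ^^^ (-b - 1).toNat : Nat) : Int) % 2
        = ((((-a - 1).toNat + (-b - 1).toNat : Nat)) : Int) % 2 := by
      exact_mod_cast h
    push_cast at this; omega

lemma band_one_emod (a : Int) : PySem.Int.band a 1 = a % 2 := by
  rw [PySem.Int.band_one]
  exact PySem.Int.mod_eq_emod_of_pos (by norm_num)

-- the tree reduction's parity is the parity of the plain sum of arr[lo..hi-1]
lemma xorRange_par (arr : List Int) :
    ∀ (k lo hi : Nat), hi - lo = k → lo < hi →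
      xorRange arr lo hi % 2
        = ((List.range' lo (hi - lo)).map (fun i => PySem.List.pyGetD arr (Int.ofNat i) 0)).sum % 2 := by
  intro k
  induction k using Nat.strong_induction_on with
  | _ k ih =>
    intro lo hi hk hlt
    rw [xorRange]
    split_ifs with hbase
    · have h1 : hi - lo = 1 := by omega
      rw [h1]
      simp [List.range']
    · have h2 : lo + 2 ≤ hi := by omega
      set mid := (lo + hi) / 2 with hmid
      have hml : lo < mid := by omega
      have hmr : mid < hi := by omega
      have e1 := ih (mid - lo) (by omega) lo mid rfl hml
      have e2 := ih (hi - mid) (by omega) mid hi rfl hmr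
      have hsplit : List.range' lo (hi - lo)
          = List.range' lo (mid - lo) ++ List.range' (lo + 1 * (mid - lo)) (hi - mid) := by
        rw [List.range'_append]
        congr 1; omega
      rw [hsplit, List.map_append, List.sum_append]
      show PySem.Int.bxor (xorRange arr lo mid) (xorRange arr mid hi) % 2 = _
      have hx := bxor_par (xorRange arr lo mid) (xorRange arr mid hi)
      have hlm : lo + 1 * (mid - lo) = mid := by omega
      rw [hlm]
      omega

-- A's counting fold has the parity of the sum of the listed elements
lemma count_par (f : Int → Int) :
    ∀ (l : List Int) (c : Int),
      (l.foldl (fun c i => if PySem.Int.band (f i) 1 ≠ 0 then c + 1 else c) c) % 2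
        = (c + (l.map f).sum) % 2 := by
  intro l
  induction l with
  | nil => intro c; simp
  | cons x xs ih =>
    intro c
    simp only [List.foldl_cons, List.map_cons, List.sum_cons]
    rw [ih]
    have hb := band_one_emod (f x)
    split_ifs with hcond <;> rw [hb] at hcond <;> omega

-- ===== VERDICT (by name: the statement is the Claim_ definition above) =====
theorem check_spec : Claim_equal_check := by
  intro arr n _ _
  unfold Spec_check check check_alt
  by_cases hn : n ≤ 0
  · have hr : PySem.List.pyRange 0 n 1 = [] := by
      rw [PySem.List.pyRange_one, show (n - 0).toNat = 0 from by omega]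
      rfl
    rw [hr]
    simp [hn, show PySem.Int.band 0 1 = 0 from by decide]
  · rw [if_neg hn]
    have hxr := xorRange_par arr n.toNat 0 n.toNat (by omega) (by omega)
    have hcnt := count_par (fun i => PySem.List.pyGetD arr i 0) (PySem.List.pyRange 0 n 1) 0
    have hmap : (PySem.List.pyRange 0 n 1).map (fun i => PySem.List.pyGetD arr i 0)
        = (List.range' 0 (n.toNat - 0)).map (fun i => PySem.List.pyGetD arr (Int.ofNat i) 0) := by
      rw [PySem.List.pyRange_one, List.range_eq_range', List.map_map]
      simp
    rw [hmap] at hcnt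
    simp only [band_one_emod] at hcnt ⊢
    rw [hcnt, hxr]
    simp
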